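-- pv_equiv track=rewrite | github.com/miliar/Code_Jam_Webscraper | solutions_python/solutions_year15_round0_nr1/2196.py | getCase
-- ===== SOURCE A (Python) =====
-- def getCase(l, k):
--     s=c=si=0
--     for i in list(l.split(" ")[1]):
--         if (s+c)<si:
--             c+=1
--         si+=1
--         s+=int(i)
--
--     return "Case #%d: %d\n" % (k, c)
-- ===== SOURCE B (Python) =====
-- def getCase(l, k):
--     digits = l.split(" ")[1]
--     vals = [int(ch) for ch in digits]
--     pref = [0]
--     for v in vals:
--         pref.append(pref[-1] + v)
--     deficits = [i - p for i, p in enumerate(pref[:-1])]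
--     ans = max([0] + deficits)
--     return "Case #%d: %d\n" % (k, ans)
-- ===== Notes on version B (the rewrite author's own statement) =====
-- stated objective: alternative
-- what changed: B replaces A's single greedy simulation loop (conditionally incrementing a friend counter) by staged passes: map digits to ints, build the prefix-sum list, form the per-level deficit list i - prefix[i], and take its maximum.
import Mathlib
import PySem

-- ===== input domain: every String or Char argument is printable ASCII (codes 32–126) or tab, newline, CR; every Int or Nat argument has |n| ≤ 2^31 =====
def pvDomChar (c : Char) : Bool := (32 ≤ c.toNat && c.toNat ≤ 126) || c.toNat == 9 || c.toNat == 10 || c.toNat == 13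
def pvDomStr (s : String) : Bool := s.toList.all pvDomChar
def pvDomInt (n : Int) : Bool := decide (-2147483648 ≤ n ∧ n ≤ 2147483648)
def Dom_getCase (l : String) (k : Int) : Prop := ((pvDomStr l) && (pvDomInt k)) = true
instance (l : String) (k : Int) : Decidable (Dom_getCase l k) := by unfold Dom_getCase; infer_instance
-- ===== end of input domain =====

-- B replaces A's single greedy simulation loop by staged list passes: map digits to ints,
-- build the prefix-sum list, form the deficit list i - prefix[i], and take its maximum.

-- ===== PORT A =====
-- the for-loop of A over the digit characters, state (s, c, si)
def getCaseLoopA : List Char → Int → Int → Int → Int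
  | [], _, c, _ => c
  | d :: ds, s, c, si =>
      let c' := if s + c < si then c + 1 else c
      getCaseLoopA ds (s + (PySem.Int.ofChars? [d]).getD 0) c' (si + 1)

def getCase (l : String) (k : Int) : String :=
  let parts := (PySem.Str.split? l " ").getD []          -- l.split(" "); sep ≠ "" so never none
  let digits := (PySem.List.pyGet? parts 1).getD ""      -- [1]: IndexError excluded by Pre_
  "Case #" ++ PySem.Int.toStr k ++ ": " ++ PySem.Int.toStr (getCaseLoopA digits.toList 0 0 0) ++ "\n"

-- ===== PORT B =====
-- pref = [0]; for v in vals: pref.append(pref[-1] + v)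
def buildPref (vals : List Int) : List Int :=
  vals.foldl (fun p v => p ++ [(PySem.List.pyGet? p (-1)).getD 0 + v]) [0]

def getCase_alt (l : String) (k : Int) : String :=
  let parts := (PySem.Str.split? l " ").getD []
  let digits := (PySem.List.pyGet? parts 1).getD ""
  let vals := digits.toList.map (fun ch => (PySem.Int.ofChars? [ch]).getD 0)  -- int(ch); ValueError excluded by Pre_
  let pref := buildPref vals
  let deficits := (PySem.List.enumerate (PySem.List.slice pref none (some (-1))) 0).map
      (fun p => p.1 - p.2)
  let ans := (PySem.List.max? ((0 : Int) :: deficits) (fun x => x)).getD 0   -- max([0] + deficits)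
  "Case #" ++ PySem.Int.toStr k ++ ": " ++ PySem.Int.toStr ans ++ "\n"

-- ===== PRECONDITION & SPEC =====
-- Pre_ excludes exactly the inputs where A raises: l.split(" ") has no second field (IndexError),
-- or some character of that field is not a decimal digit (ValueError from int()).
def Pre_getCase (l : String) (_k : Int) : Prop :=
  2 ≤ (PySem.Chars.splitOn l.toList [' ']).length ∧
  ((PySem.List.pyGet? (PySem.Chars.splitOn l.toList [' ']) 1).getD []).all PySem.Chars.isdigit = true
instance (l : String) (k : Int) : Decidable (Pre_getCase l k) := by unfold Pre_getCase; infer_instance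

def pvWitness_getCase : String × Int := ("0 1", 0)

def Spec_getCase (l : String) (k : Int) (out : String) : Prop := out = getCase_alt l k
instance (l : String) (k : Int) (out : String) : Decidable (Spec_getCase l k out) := by unfold Spec_getCase; infer_instance

-- ===== CLAIM (what is proved, stated in full; the proofs are below) =====
def Claim_equal_getCase : Prop := ∀ (l : String) (k : Int), Dom_getCase l k → Pre_getCase l k → Spec_getCase l k (getCase l k)

-- ===== LEMMAS AND PROOFS =====

-- the digit field the ports read, re-expressed on the List Char level Pre_getCase speaks about
theorem digits_bridge (l : String) :
    ((PySem.List.pyGet? ((PySem.Str.split? l " ").getD []) 1).getD "").toList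
     = (PySem.List.pyGet? (PySem.Chars.splitOn l.toList [' ']) 1).getD [] := by
  have h := PySem.Str.split?_map l " "
  have e : (" " : String).toList = [' '] := rfl
  rw [e] at h
  have h2 : PySem.Chars.split? l.toList [' '] = some (PySem.Chars.splitOn l.toList [' ']) := by
    simp [PySem.Chars.split?]
  rw [h2] at h
  cases hs : PySem.Str.split? l " " with
  | none => rw [hs] at h; simp at h
  | some parts =>
      rw [hs] at h; simp at h
      simp [← h, PySem.List.pyGet?, List.getElem?_map]
      cases PySem.List.pyIdx? parts.length 1 with
      | none => rfl
      | some a => simp only [Option.bind_some]; cases parts[a]? <;> rfl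

-- int(ch) on a digit character returns its value (≥ 0); the only PySem fact the loops need
theorem digit_parse (d : Char) (h : PySem.Chars.isdigit d = true) :
    PySem.Int.ofChars? [d] = some ((d.toNat : Int) - 48) ∧ 48 ≤ d.toNat := by
  simp [PySem.Chars.isdigit, Char.le_def] at h
  obtain ⟨h1, h2⟩ := h
  have e1 : (48 : UInt32).toNat = 48 := rfl
  have e2 : (57 : UInt32).toNat = 57 := rfl
  have h1' : 48 ≤ d.toNat := by
    have := UInt32.le_iff_toNat_le.mp h1; unfold Char.toNat; omega
  have h2' : d.toNat ≤ 57 := by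
    have := UInt32.le_iff_toNat_le.mp h2; unfold Char.toNat; omega
  refine ⟨?_, h1'⟩
  have he : d = Char.ofNat d.toNat := (Char.ofNat_toNat d).symm
  rw [he]
  interval_cases h3 : d.toNat <;> decide

-- proof-only running-max loop, the bridge between A's greedy counter and B's staged passes
def loopM : List Int → Int → Int → Int → Int
  | [], _, _, ans => ans
  | v :: vs, i, standing, ans => loopM vs (i + 1) (standing + v) (max ans (i - standing))

-- proof-only tail of the prefix-sum list
def scanTail : Int → List Int → List Int
  | _, [] => []
  | a, v :: vs => (a + v) :: scanTail (a + v) vs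

-- pref[-1] on a nonempty list is its last element
theorem pyGet_last (p : List Int) (a : Int) :
    PySem.List.pyGet? (p ++ [a]) (-1) = some a := by
  simp [PySem.List.pyGet?, PySem.List.pyIdx?]

-- the append loop builds p ++ [a] ++ scanTail a vs
theorem buildPref_aux (vs : List Int) (p : List Int) (a : Int) :
    vs.foldl (fun q v => q ++ [(PySem.List.pyGet? q (-1)).getD 0 + v]) (p ++ [a])
      = (p ++ [a]) ++ scanTail a vs := by
  induction vs generalizing p a with
  | nil => simp [scanTail]
  | cons v vs ih =>
      simp only [List.foldl_cons, pyGet_last, Option.getD_some, scanTail]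
      have := ih (p ++ [a]) (a + v)
      simpa [List.append_assoc] using this

theorem buildPref_eq (vs : List Int) : buildPref vs = 0 :: scanTail 0 vs := by
  have := buildPref_aux vs [] 0
  simpa [buildPref] using this

-- invariant si - s ≤ c + 1 links A's greedy counter to the running max of deficits
theorem loopA_eq_loopM (ds : List Char) (s c si : Int)
    (hd : ∀ d ∈ ds, PySem.Chars.isdigit d = true)
    (h : si - s ≤ c + 1) :
    getCaseLoopA ds s c si
      = loopM (ds.map (fun ch => (PySem.Int.ofChars? [ch]).getD 0)) si s c := by
  induction ds generalizing s c si with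
  | nil => rfl
  | cons d ds ih =>
    obtain ⟨hv, hb⟩ := digit_parse d (hd d (List.mem_cons_self ..))
    have hv0 : (0 : Int) ≤ (PySem.Int.ofChars? [d]).getD 0 := by
      rw [hv]; simp; omega
    have hmax : (if s + c < si then c + 1 else c) = max c (si - s) := by
      split_ifs with hc <;> omega
    simp only [getCaseLoopA, List.map_cons, loopM, hmax]
    exact ih _ _ _ (fun x hx => hd x (List.mem_cons_of_mem d hx)) (by omega)

-- the running max IS the fold of max over the enumerated prefix-sum deficits
theorem loopM_eq_fold (vs : List Int) (i a ans : Int) :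
    loopM vs i a ans
      = ((PySem.List.enumerate ((a :: scanTail a vs).dropLast) i).map
          (fun p => p.1 - p.2)).foldl max ans := by
  induction vs generalizing i a ans with
  | nil => simp [loopM, scanTail]
  | cons v vs ih =>
      have hne : scanTail a (v :: vs) ≠ [] := by simp [scanTail]
      have hdl : (a :: scanTail a (v :: vs)).dropLast
          = a :: (scanTail a (v :: vs)).dropLast := List.dropLast_cons_of_ne_nil hne
      rw [loopM, ih, hdl, PySem.List.enumerate_cons]
      simp [scanTail]

-- A's counter equals B's staged max, for any all-digit character list
theorem ans_eq (ds : List Char) (hd : ∀ d ∈ ds, PySem.Chars.isdigit d = true) :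
    getCaseLoopA ds 0 0 0
      = (PySem.List.max? ((0 : Int) ::
          ((PySem.List.enumerate
              (PySem.List.slice (buildPref (ds.map fun ch => (PySem.Int.ofChars? [ch]).getD 0))
                none (some (-1))) 0).map (fun p => p.1 - p.2))) (fun x => x)).getD 0 := by
  rw [loopA_eq_loopM ds 0 0 0 hd (by omega), loopM_eq_fold]
  rw [buildPref_eq, PySem.List.slice_to_neg_one]
  cases hM : PySem.List.max? ((0 : Int) ::
      ((PySem.List.enumerate ((0 :: scanTail 0 (ds.map fun ch => (PySem.Int.ofChars? [ch]).getD 0)).dropLast) 0).map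
        (fun p => p.1 - p.2))) (fun x => x) with
  | none => simp [PySem.List.max?_eq_none_iff] at hM
  | some m =>
      rw [PySem.List.max?_id_cons] at hM
      simp at hM
      simp [← hM]

-- ===== VERDICT (by name: the statement is the Claim_ definition above) =====
theorem getCase_spec : Claim_equal_getCase := by
  intro l k _hdom hpre
  have hd : ∀ d ∈ ((PySem.List.pyGet? ((PySem.Str.split? l " ").getD []) 1).getD "").toList,
      PySem.Chars.isdigit d = true := by
    intro d hdm
    exact List.all_eq_true.mp hpre.2 d ((digits_bridge l) ▸ hdm)
  exact congrArg (fun c => "Case #" ++ PySem.Int.toStr k ++ ": " ++ PySem.Int.toStr c ++ "\n")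
    (ans_eq _ hd)
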